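-- pv_equiv track=rewrite | github.com/niktayek/avestan-computational-philology | src/matchers/dictionary_matcher/replacer/replace_word_generator.py | exact_replace_consonants
-- ===== SOURCE A (Python) =====
-- def exact_replace_consonants(ocr_list, manual_list):
--     ocr_ind = 0
--     manual_ind = 0
--     while ocr_ind < len(ocr_list):
--         if not ocr_list[ocr_ind][1]:
--             ocr_ind += 1
--             continue
--         if not manual_list[manual_ind][1]:
--             manual_ind += 1
--             continue
--         ocr_list[ocr_ind][0] = manual_list[manual_ind][0]
--         ocr_ind += 1
--         manual_ind += 1
--
--     return ''.join([part[0] for part in ocr_list])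
-- ===== SOURCE B (Python) =====
-- def exact_replace_consonants(ocr_list, manual_list):
--     manual_consonants = [p for p in manual_list if p[1]]
--     j = 0
--     for part in ocr_list:
--         if part[1]:
--             part[0] = manual_consonants[j][0]
--             j += 1
--     return ''.join(part[0] for part in ocr_list)
-- ===== Notes on version B (the rewrite author's own statement) =====
-- stated objective: simpler
-- what changed: B pre-filters manual_list into the list of consonant parts once, then makes a single for-loop over ocr_list with one counter, instead of A's two-pointer while loop with index bookkeeping and a manual-skip branch.
-- outside the precondition, e.g. on exact_replace_consonants([['a', 'x']], [['b', 'y'], ['c']]): A returns 'b', B raises IndexError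
import Mathlib
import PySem

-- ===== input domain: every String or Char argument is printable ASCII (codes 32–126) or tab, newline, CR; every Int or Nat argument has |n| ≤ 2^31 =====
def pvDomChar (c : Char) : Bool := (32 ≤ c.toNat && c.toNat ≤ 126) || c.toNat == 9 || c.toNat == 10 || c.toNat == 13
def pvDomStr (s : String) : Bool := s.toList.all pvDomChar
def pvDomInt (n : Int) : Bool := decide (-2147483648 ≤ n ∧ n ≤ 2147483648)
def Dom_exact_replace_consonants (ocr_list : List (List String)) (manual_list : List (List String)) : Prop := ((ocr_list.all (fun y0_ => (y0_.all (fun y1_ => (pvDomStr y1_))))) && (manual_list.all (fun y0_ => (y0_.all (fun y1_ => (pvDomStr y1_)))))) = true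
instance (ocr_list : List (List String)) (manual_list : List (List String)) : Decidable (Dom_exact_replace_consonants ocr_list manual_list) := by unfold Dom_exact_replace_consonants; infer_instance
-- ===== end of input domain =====

-- B replaces A's two-pointer while loop by a one-shot filter of the manual consonant parts plus a
-- single counting pass over ocr_list (objective: simpler). Both Pythons mutate ocr_list's inner
-- lists in place; the equivalence proved here is about the RETURN value only.

-- ===== PORT A =====
-- `part[1]` used as a Python truth value (a string is truthy iff nonempty; [1] out of range raises,
-- excluded by Pre_ — the `.getD` defaults are never reached inside Pre_).
def consFlag (p : List String) : Bool := !(((PySem.List.pyGet? p 1).getD "") == "")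

-- A's while loop over the two indices; fuel only makes the recursion structural (under
-- Pre_ the loop always ends before the fuel does).
def aLoop (ocr manual : List (List String)) (oi mi fuel : Nat) : List (List String) :=
  match fuel with
  | 0 => ocr
  | fuel' + 1 =>
    if oi < ocr.length then
      if !(consFlag ((PySem.List.pyGet? ocr (oi : Int)).getD [])) then
        aLoop ocr manual (oi + 1) mi fuel'
      else if !(consFlag ((PySem.List.pyGet? manual (mi : Int)).getD [])) then
        aLoop ocr manual oi (mi + 1) fuel'
      else
        aLoop (PySem.List.pySetD ocr (oi : Int)
                 (PySem.List.pySetD ((PySem.List.pyGet? ocr (oi : Int)).getD []) 0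
                   ((PySem.List.pyGet? ((PySem.List.pyGet? manual (mi : Int)).getD []) 0).getD "")))
              manual (oi + 1) (mi + 1) fuel'
    else ocr

def exact_replace_consonants (ocr_list : List (List String)) (manual_list : List (List String)) : String :=
  PySem.Str.join ""
    ((aLoop ocr_list manual_list 0 0 (ocr_list.length + manual_list.length + 1)).map
      (fun part => (PySem.List.pyGet? part 0).getD ""))

-- ===== PORT B =====
-- the single pass `for part in ocr_list` with counter j
def bLoop (parts mc : List (List String)) (j : Nat) : List (List String) :=
  match parts with
  | [] => []
  | p :: rest =>
    if consFlag p then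
      PySem.List.pySetD p 0
          ((PySem.List.pyGet? ((PySem.List.pyGet? mc (j : Int)).getD []) 0).getD "")
        :: bLoop rest mc (j + 1)
    else p :: bLoop rest mc j

def exact_replace_consonants_alt (ocr_list : List (List String)) (manual_list : List (List String)) : String :=
  let manual_consonants := manual_list.filter consFlag
  PySem.Str.join ""
    ((bLoop ocr_list manual_consonants 0).map
      (fun part => (PySem.List.pyGet? part 0).getD ""))

-- ===== PRECONDITION & SPEC =====
-- Pre_ excludes (a) inputs where A raises IndexError (a part of length < 2 that A reads, or fewer
-- truthy manual parts than truthy ocr parts), and (b) — cited in claim.json — inputs with a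
-- short manual part lying after the last manual consonant A consumes, where A returns but B's
-- eager filter of manual_list raises the IndexError A only avoids by laziness.
def Pre_exact_replace_consonants (ocr_list : List (List String)) (manual_list : List (List String)) : Prop :=
  (∀ p ∈ ocr_list, 2 ≤ p.length) ∧ (∀ p ∈ manual_list, 2 ≤ p.length) ∧
    (ocr_list.filter consFlag).length ≤ (manual_list.filter consFlag).length
instance (ocr_list : List (List String)) (manual_list : List (List String)) : Decidable (Pre_exact_replace_consonants ocr_list manual_list) := by unfold Pre_exact_replace_consonants; infer_instance

def pvWitness_exact_replace_consonants : List (List String) × List (List String) :=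
  ([["a", "x"], ["b", ""]], [["t", "y"], ["u", "z"]])

def Spec_exact_replace_consonants (ocr_list : List (List String)) (manual_list : List (List String)) (out : String) : Prop := out = exact_replace_consonants_alt ocr_list manual_list
instance (ocr_list : List (List String)) (manual_list : List (List String)) (out : String) : Decidable (Spec_exact_replace_consonants ocr_list manual_list out) := by unfold Spec_exact_replace_consonants; infer_instance

-- ===== CLAIM (what is proved, stated in full; the proofs are below) =====
def Claim_equal_exact_replace_consonants : Prop := ∀ (ocr_list : List (List String)) (manual_list : List (List String)), Dom_exact_replace_consonants ocr_list manual_list → Pre_exact_replace_consonants ocr_list manual_list → Spec_exact_replace_consonants ocr_list manual_list (exact_replace_consonants ocr_list manual_list)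

-- ===== LEMMAS AND PROOFS =====

-- common shape of both loops: replace each truthy part's head by the head of the next
-- consonant of ms, consuming ms one entry per truthy part
def replaceC (xs ms : List (List String)) : List (List String)  :=
  match xs with
  | [] => []
  | p :: rest =>
    if consFlag p then
      PySem.List.pySetD p 0 ((PySem.List.pyGet? (ms.headD []) 0).getD "") :: replaceC rest ms.tail
    else p :: replaceC rest ms

lemma bLoop_eq_replaceC (parts mc : List (List String)) (j : Nat) :
    bLoop parts mc j = replaceC parts (mc.drop j) := by
  induction parts generalizing j with
  | nil => rfl
  | cons p rest ih =>
    simp only [bLoop, replaceC]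
    by_cases h : consFlag p
    · simp [h, ih, List.tail_drop, List.headD_eq_head?_getD, List.head?_drop,
        PySem.List.pyGet?_natCast]
    · simp [h, ih]

lemma replaceC_cons (p : List String) (rest ms : List (List String)) :
    replaceC (p :: rest) ms =
      if consFlag p then
        PySem.List.pySetD p 0 ((PySem.List.pyGet? (ms.headD []) 0).getD "")
          :: replaceC rest ms.tail
      else p :: replaceC rest ms := rfl

lemma aLoop_eq_replaceC (ocr manual : List (List String)) (oi mi fuel : Nat)
    (hocr : ∀ p ∈ ocr, 2 ≤ p.length)
    (hcnt : ((ocr.drop oi).filter consFlag).length ≤ ((manual.drop mi).filter consFlag).length)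
    (hfuel : (ocr.length - oi) + (manual.length - mi) < fuel) :
    aLoop ocr manual oi mi fuel =
      ocr.take oi ++ replaceC (ocr.drop oi) ((manual.drop mi).filter consFlag) := by
  induction fuel generalizing ocr oi mi with
  | zero => omega
  | succ fuel' ih =>
    unfold aLoop
    by_cases ho : oi < ocr.length
    · have hdrop : ocr.drop oi = ocr[oi] :: ocr.drop (oi + 1) := List.drop_eq_getElem_cons ho
      have hget : (PySem.List.pyGet? ocr (oi : Int)).getD [] = ocr[oi] := by
        simp [PySem.List.pyGet?_natCast, List.getElem?_eq_getElem ho]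
      by_cases hp : consFlag ocr[oi]
      · -- truthy ocr part: the manual side still holds a consonant
        have hfo : ((ocr.drop oi).filter consFlag).length
            = ((ocr.drop (oi + 1)).filter consFlag).length + 1 := by
          rw [hdrop, List.filter_cons, if_pos hp]; rfl
        have hne : ((manual.drop mi).filter consFlag) ≠ [] := by
          intro hnil; rw [hfo, hnil] at hcnt; simp at hcnt
        have hmi : mi < manual.length := by
          by_contra hle
          exact hne (by simp [List.drop_eq_nil_of_le (by omega : manual.length ≤ mi)])
        have hmdrop : manual.drop mi = manual[mi] :: manual.drop (mi + 1) :=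
          List.drop_eq_getElem_cons hmi
        have hmget : (PySem.List.pyGet? manual (mi : Int)).getD [] = manual[mi] := by
          simp [PySem.List.pyGet?_natCast, List.getElem?_eq_getElem hmi]
        by_cases hm : consFlag manual[mi]
        · -- both truthy: replace ocr[oi]'s head, advance both indices
          have hfilt : (manual.drop mi).filter consFlag
              = manual[mi] :: (manual.drop (mi + 1)).filter consFlag := by
            rw [hmdrop, List.filter_cons, if_pos hm]
          simp only [ho, if_true, hget, hmget, hp, hm, Bool.not_true, Bool.false_eq_true,
            if_false, PySem.List.pySetD_natCast]
          set q : List String := PySem.List.pySetD ocr[oi] 0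
            ((PySem.List.pyGet? manual[mi] 0).getD "") with hq
          rw [ih (ocr.set oi q) (oi + 1) (mi + 1)
            (by
              intro p hpmem
              rcases List.mem_or_eq_of_mem_set hpmem with h | h
              · exact hocr p h
              · have := hocr ocr[oi] (List.getElem_mem ho)
                simp [h, hq, PySem.List.length_pySetD]; omega)
            (by
              rw [List.drop_set_of_lt (by omega : oi < oi + 1)]
              rw [hfilt] at hcnt
              simp only [List.length_cons] at hcnt
              omega)
            (by simp only [List.length_set]; omega)]
          have htake : (ocr.set oi q).take (oi + 1) = ocr.take oi ++ [q] := by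
            rw [List.take_add_one, List.take_set_of_le (le_refl oi),
              List.getElem?_set_self (by simpa using ho)]
            simp
          rw [htake, List.drop_set_of_lt (by omega : oi < oi + 1), hfilt, hdrop,
            replaceC_cons, if_pos hp]
          simp [hq]
        · -- manual part falsy: skip it
          have hfm : ((manual.drop (mi + 1)).filter consFlag)
              = ((manual.drop mi).filter consFlag) := by
            conv_rhs => rw [hmdrop, List.filter_cons, if_neg (by simp [hm])]
          simp only [ho, if_true, hget, hmget, hp, hm, Bool.not_true, Bool.not_false,
            Bool.false_eq_true, if_false]
          rw [ih ocr oi (mi + 1) hocr (by rw [hfm]; exact hcnt) (by omega), hfm]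
      · -- falsy ocr part: keep it, advance
        have hfo : ((ocr.drop (oi + 1)).filter consFlag)
            = ((ocr.drop oi).filter consFlag) := by
          conv_rhs => rw [hdrop, List.filter_cons, if_neg (by simp [hp])]
        simp only [ho, if_true, hget, hp, Bool.not_false, if_true]
        rw [ih ocr (oi + 1) mi hocr (by rw [hfo]; exact hcnt) (by omega)]
        conv_rhs => rw [hdrop, replaceC_cons, if_neg (by simp [hp])]
        rw [List.take_add_one, List.getElem?_eq_getElem ho]
        simp only [Option.toList_some, List.append_assoc, List.cons_append, List.nil_append]
    · have h1 : ocr.drop oi = [] := List.drop_eq_nil_of_le (by omega)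
      have h2 : ocr.take oi = ocr := List.take_of_length_le (by omega)
      simp [ho, h1, h2, replaceC]

-- ===== VERDICT (by name: the statement is the Claim_ definition above) =====
theorem exact_replace_consonants_spec : Claim_equal_exact_replace_consonants := by
  intro ocr manual _ ⟨hocr, hman, hcnt⟩
  unfold Spec_exact_replace_consonants exact_replace_consonants exact_replace_consonants_alt
  rw [aLoop_eq_replaceC ocr manual 0 0 _ hocr (by simpa using hcnt) (by omega)]
  simp [bLoop_eq_replaceC]
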